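-- pv_equiv track=rewrite | github.com/trangyp/AMOS-Code | comprehensive_fix.py | fix_misplaced_imports
-- ===== SOURCE A (Python) =====
-- def fix_misplaced_imports(content):
--     """Fix imports that are at wrong indentation level inside try/except blocks."""
--     lines = content.split("\n")
--     new_lines = []
--     i = 0
--     while i < len(lines):
--         line = lines[i]
--         stripped = line.strip()
--
--         # Check if this is a try block
--         if stripped == "try:":
--             try_indent = len(line) - len(line.lstrip())
--             new_lines.append(line)
--             i += 1
--
--             # Process lines inside try block
--             while i < len(lines):
--                 current_line = lines[i]
--                 current_stripped = current_line.strip()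
--                 current_indent = len(current_line) - len(current_line.lstrip())
--
--                 # Check for except/finally to exit try block
--                 if current_stripped.startswith("except") or current_stripped.startswith("finally"):
--                     break
--
--                 # Check for misindented imports at same level as try
--                 if (
--                     current_stripped.startswith(("from ", "import "))
--                     and current_indent <= try_indent
--                 ):
--                     # Fix indentation
--                     fixed_line = "    " + current_stripped
--                     new_lines.append(fixed_line)
--                     i += 1
--                     continue
--
--                 new_lines.append(current_line)
--                 i += 1
--             continue
--
--         new_lines.append(line)
--         i += 1
--
--     return "\n".join(new_lines)
-- ===== SOURCE B (Python) =====
-- def _next_state(st, line):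
--     """State transition: st is None (outside any try block) or the indent of
--     the innermost enclosing try block."""
--     stripped = line.strip()
--     if st is None:
--         return (len(line) - len(line.lstrip())) if stripped == "try:" else None
--     if stripped.startswith("except") or stripped.startswith("finally"):
--         return None
--     return st
--
--
-- def _render(st, line):
--     """Rewrite one line given the state holding BEFORE it."""
--     if st is None:
--         return line
--     stripped = line.strip()
--     if stripped.startswith("except") or stripped.startswith("finally"):
--         return line
--     if (stripped.startswith("from ") or stripped.startswith("import ")) \
--             and len(line) - len(line.lstrip()) <= st:
--         return "    " + stripped
--     return line
--
--
-- def fix_misplaced_imports(content):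
--     """Fix imports that are at wrong indentation level inside try/except blocks.
--
--     Two staged passes: first compute, for every line, the state holding before
--     it (outside a try block, or the indent of the enclosing 'try:'); then
--     render each line from its precomputed state.
--     """
--     lines = content.split("\n")
--     states = []
--     st = None
--     for line in lines:
--         states.append(st)
--         st = _next_state(st, line)
--     return "\n".join(_render(s, l) for s, l in zip(states, lines))
-- ===== Notes on version B (the rewrite author's own statement) =====
-- stated objective: alternative
-- what changed: Replaces A's nested while loops over a shared index with a two-pass design: a first pass computes the state (outside a try block, or the enclosing try indent) before each line via a pure transition function, and a second pass renders each line from its precomputed state.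
import Mathlib
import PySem

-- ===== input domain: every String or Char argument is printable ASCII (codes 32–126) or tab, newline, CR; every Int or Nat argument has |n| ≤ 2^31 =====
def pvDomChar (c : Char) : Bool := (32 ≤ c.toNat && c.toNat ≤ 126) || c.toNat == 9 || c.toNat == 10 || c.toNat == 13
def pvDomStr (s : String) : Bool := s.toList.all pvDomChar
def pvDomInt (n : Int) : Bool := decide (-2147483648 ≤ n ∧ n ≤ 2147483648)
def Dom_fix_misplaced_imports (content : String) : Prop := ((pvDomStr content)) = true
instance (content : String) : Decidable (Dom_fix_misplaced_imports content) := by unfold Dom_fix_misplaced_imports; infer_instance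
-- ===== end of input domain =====

-- B replaces A's nested while loops (outer scan + inner try-block scan sharing one
-- index) by two staged passes: compute the state before each line, then render each
-- line from its state; same O(n) cost, return values proved equal on all inputs.

-- ===== PORT A =====
-- A's two while loops. Each iteration of either loop consumes lines[i] and
-- advances i, so they are the two mutually recursive scans below over the
-- remaining lines. indent(line) = len(line) - len(line.lstrip()).
mutual
  def fixMisOuter : List String → List String
    | [] => []
    | line :: rest =>
      if PySem.Str.strip line == "try:" then
        line :: fixMisInner rest
          (PySem.Str.len line - PySem.Str.len (PySem.Str.lstrip line))
      else
        line :: fixMisOuter rest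
  def fixMisInner : List String → Int → List String
    | [], _ => []
    | line :: rest, tryIndent =>
      if PySem.Str.startswith (PySem.Str.strip line) "except" ||
         PySem.Str.startswith (PySem.Str.strip line) "finally" then
        -- Python's 'break': the outer loop re-reads this very line; its strip starts
        -- with "except"/"finally", hence is never "try:", so the outer loop appends
        -- it unchanged and continues with rest — that single outer step is inlined
        -- here so that the recursion stays structural (no index ever revisited twice).
        line :: fixMisOuter rest
      else if (PySem.Str.startswith (PySem.Str.strip line) "from " ||
               PySem.Str.startswith (PySem.Str.strip line) "import ") &&
              decide (PySem.Str.len line - PySem.Str.len (PySem.Str.lstrip line) ≤ tryIndent) then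
        ("    " ++ PySem.Str.strip line) :: fixMisInner rest tryIndent
      else
        line :: fixMisInner rest tryIndent
end

-- content.split("\n") (sep ≠ "", so PySem.Chars.splitOn is exact), '\n'.join(...)
def fix_misplaced_imports (content : String) : String :=
  PySem.Str.join "\n"
    (fixMisOuter ((PySem.Chars.splitOn content.toList ['\n']).map String.ofList))

-- ===== PORT B =====
-- _next_state: none = outside any try block, some t = inside one whose 'try:' had indent t
def fixMisNextState (st : Option Int) (line : String) : Option Int :=
  match st with
  | none =>
    if PySem.Str.strip line == "try:" then
      some (PySem.Str.len line - PySem.Str.len (PySem.Str.lstrip line))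
    else none
  | some t =>
    if PySem.Str.startswith (PySem.Str.strip line) "except" ||
       PySem.Str.startswith (PySem.Str.strip line) "finally" then none
    else some t

-- _render: rewrite one line given the state holding before it
def fixMisRender (st : Option Int) (line : String) : String :=
  match st with
  | none => line
  | some t =>
    if PySem.Str.startswith (PySem.Str.strip line) "except" ||
       PySem.Str.startswith (PySem.Str.strip line) "finally" then line
    else if (PySem.Str.startswith (PySem.Str.strip line) "from " ||
             PySem.Str.startswith (PySem.Str.strip line) "import ") &&
            decide (PySem.Str.len line - PySem.Str.len (PySem.Str.lstrip line) ≤ t) then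
      "    " ++ PySem.Str.strip line
    else line

-- pass 1: the for-loop appending the state before each line (states list)
def fixMisStates (st : Option Int) : List String → List (Option Int)
  | [] => []
  | line :: rest => st :: fixMisStates (fixMisNextState st line) rest

-- pass 2: zip states with lines and render each pair, then join
def fix_misplaced_imports_alt (content : String) : String :=
  PySem.Str.join "\n"
    (((fixMisStates none ((PySem.Chars.splitOn content.toList ['\n']).map String.ofList)).zip
        ((PySem.Chars.splitOn content.toList ['\n']).map String.ofList)).map
      (fun p => fixMisRender p.1 p.2))

-- ===== PRECONDITION & SPEC =====
def Spec_fix_misplaced_imports (content : String) (out : String) : Prop := out = fix_misplaced_imports_alt content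
instance (content : String) (out : String) : Decidable (Spec_fix_misplaced_imports content out) := by unfold Spec_fix_misplaced_imports; infer_instance

-- ===== CLAIM (what is proved, stated in full; the proofs are below) =====
def Claim_equal_fix_misplaced_imports : Prop := ∀ (content : String), Dom_fix_misplaced_imports content → Spec_fix_misplaced_imports content (fix_misplaced_imports content)

-- ===== LEMMAS AND PROOFS =====

-- Invariant: rendering each line from its precomputed state reproduces A's
-- outer loop when the state is none, and A's inner loop (with the recorded
-- try indent) when the state is some t.
theorem fixMisTwoPass_eq (ls : List String) :
    (((fixMisStates none ls).zip ls).map (fun p => fixMisRender p.1 p.2) = fixMisOuter ls) ∧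
    (∀ t : Int,
      ((fixMisStates (some t) ls).zip ls).map (fun p => fixMisRender p.1 p.2) = fixMisInner ls t) := by
  induction ls with
  | nil => exact ⟨rfl, fun _ => rfl⟩
  | cons line rest ih =>
    constructor
    · rw [fixMisStates, List.zip_cons_cons, List.map_cons, fixMisOuter]
      by_cases h : (PySem.Str.strip line == "try:") = true
      · rw [if_pos h,
            show fixMisRender none line = line from rfl,
            show fixMisNextState none line =
              some (PySem.Str.len line - PySem.Str.len (PySem.Str.lstrip line)) from by
                simp only [fixMisNextState]; rw [if_pos h],
            ih.2]
      · rw [if_neg h,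
            show fixMisRender none line = line from rfl,
            show fixMisNextState none line = none from by simp only [fixMisNextState]; rw [if_neg h],
            ih.1]
    · intro t
      rw [fixMisStates, List.zip_cons_cons, List.map_cons, fixMisInner]
      by_cases hef : (PySem.Str.startswith (PySem.Str.strip line) "except" ||
                      PySem.Str.startswith (PySem.Str.strip line) "finally") = true
      · rw [if_pos hef,
            show fixMisRender (some t) line = line from by simp only [fixMisRender]; rw [if_pos hef],
            show fixMisNextState (some t) line = none from by simp only [fixMisNextState]; rw [if_pos hef],
            ih.1]
      · rw [if_neg hef,
            show fixMisNextState (some t) line = some t from by simp only [fixMisNextState]; rw [if_neg hef]]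
        by_cases himp : ((PySem.Str.startswith (PySem.Str.strip line) "from " ||
              PySem.Str.startswith (PySem.Str.strip line) "import ") &&
              decide (PySem.Str.len line - PySem.Str.len (PySem.Str.lstrip line) ≤ t)) = true
        · rw [if_pos himp,
              show fixMisRender (some t) line = "    " ++ PySem.Str.strip line from by
                simp only [fixMisRender]; rw [if_neg hef, if_pos himp],
              ih.2]
        · rw [if_neg himp,
              show fixMisRender (some t) line = line from by simp only [fixMisRender]; rw [if_neg hef, if_neg himp],
              ih.2]

-- ===== VERDICT (by name: the statement is the Claim_ definition above) =====
theorem fix_misplaced_imports_spec : Claim_equal_fix_misplaced_imports := by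
  intro content _
  unfold Spec_fix_misplaced_imports fix_misplaced_imports fix_misplaced_imports_alt
  rw [(fixMisTwoPass_eq ((PySem.Chars.splitOn content.toList ['\n']).map String.ofList)).1]
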